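-- pv_equiv track=rewrite | github.com/PyJobShop/FJSPLIB | fjsplib/read.py | compute_precedences
-- ===== SOURCE A (Python) =====
-- ProcessingData = list[tuple[int, int]]
--
-- Arc = tuple[int, int]
--
-- def compute_precedences(jobs: list[list[ProcessingData]]) -> list[Arc]:
--     """
--     Computes precedence relationships based on the job data.
--
--     In the classic FJSP, it is assumed that operations are processed in
--     sequence of their appearance in the job data.
--     """
--     precedences: list[Arc] = []
--     idx = 0
--
--     for operations in jobs:
--         arcs = range(idx, idx + len(operations) - 1)
--         precedences.extend((i, i + 1) for i in arcs)
--         idx += len(operations)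
--
--     return precedences
-- ===== SOURCE B (Python) =====
-- def compute_precedences(jobs):
--     # Single flat pass: collect job-start boundary indices, then link i -> i+1
--     # whenever i+1 does not start a new job.
--     starts = set()
--     total = 0
--     for operations in jobs:
--         starts.add(total)
--         total += len(operations)
--     starts.add(total)
--     return [(i, i + 1) for i in range(total - 1) if i + 1 not in starts]
-- ===== Notes on version B (the rewrite author's own statement) =====
-- stated objective: alternative
-- what changed: Replaces the per-job nested loop emitting each job's arcs with a boundary set of cumulative job-start offsets followed by one flat pass over all global indices, keeping (i, i+1) unless i+1 starts a job.
import Mathlib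
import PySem

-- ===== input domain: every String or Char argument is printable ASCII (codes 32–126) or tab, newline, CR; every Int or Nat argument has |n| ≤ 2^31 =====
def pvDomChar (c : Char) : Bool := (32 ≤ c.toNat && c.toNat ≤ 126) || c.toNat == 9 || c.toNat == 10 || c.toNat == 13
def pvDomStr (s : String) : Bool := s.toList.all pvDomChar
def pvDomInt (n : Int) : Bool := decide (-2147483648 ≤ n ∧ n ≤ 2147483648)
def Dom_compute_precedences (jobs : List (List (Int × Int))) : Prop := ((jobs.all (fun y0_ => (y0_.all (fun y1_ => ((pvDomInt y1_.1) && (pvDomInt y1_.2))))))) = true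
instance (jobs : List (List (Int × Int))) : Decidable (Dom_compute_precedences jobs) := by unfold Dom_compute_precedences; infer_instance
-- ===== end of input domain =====

-- B replaces A's per-job nested loop and running offset with a boundary set of
-- cumulative job-start offsets plus one flat pass over all global indices (alternative decomposition).

-- ===== PORT A =====
def compute_precedences (jobs : List (List (Int × Int))) : List (Int × Int) :=
  (jobs.foldl
    (fun (st : List (Int × Int) × Int) operations =>
      (st.1 ++ (PySem.List.pyRange st.2 (st.2 + (operations.length : Int) - 1) 1).map
          (fun i => (i, i + 1)),
       st.2 + (operations.length : Int)))
    ([], 0)).1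

-- ===== PORT B =====
def compute_precedences_alt (jobs : List (List (Int × Int))) : List (Int × Int) :=
  let st := jobs.foldl
    (fun (st : PySem.Set Int × Int) operations =>
      (PySem.Set.add st.1 st.2, st.2 + (operations.length : Int)))
    (PySem.Set.empty, 0)
  let starts := PySem.Set.add st.1 st.2
  let total := st.2
  ((PySem.List.pyRange 0 (total - 1) 1).filter
      (fun i => !(PySem.Set.contains starts (i + 1)))).map (fun i => (i, i + 1))

-- ===== PRECONDITION & SPEC =====
def Spec_compute_precedences (jobs : List (List (Int × Int))) (out : List (Int × Int)) : Prop := out = compute_precedences_alt jobs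
instance (jobs : List (List (Int × Int))) (out : List (Int × Int)) : Decidable (Spec_compute_precedences jobs out) := by unfold Spec_compute_precedences; infer_instance

-- ===== CLAIM (what is proved, stated in full; the proofs are below) =====
def Claim_equal_compute_precedences : Prop := ∀ (jobs : List (List (Int × Int))), Dom_compute_precedences jobs → Spec_compute_precedences jobs (compute_precedences jobs)

-- ===== LEMMAS AND PROOFS =====

-- A's per-job emission starting at a given offset
def pvP : List (List (Int × Int)) → Int → List (Int × Int)
  | [], _ => []
  | ops :: rest, idx =>
    (PySem.List.pyRange idx (idx + (ops.length : Int) - 1) 1).map (fun i => (i, i + 1))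
      ++ pvP rest (idx + (ops.length : Int))

-- final offset after all jobs
def pvTot : List (List (Int × Int)) → Int → Int
  | [], idx => idx
  | ops :: rest, idx => pvTot rest (idx + (ops.length : Int))

-- cumulative job-start boundaries (including the start and the final offset)
def pvBnd : List (List (Int × Int)) → Int → List Int
  | [], idx => [idx]
  | ops :: rest, idx => idx :: pvBnd rest (idx + (ops.length : Int))

theorem pvTot_ge : ∀ (jobs : List (List (Int × Int))) (idx : Int), idx ≤ pvTot jobs idx
  | [], idx => le_refl idx
  | ops :: rest, idx => by
    have h := pvTot_ge rest (idx + (ops.length : Int))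
    simp only [pvTot]
    omega

theorem pvBnd_lb : ∀ (jobs : List (List (Int × Int))) (idx x : Int), x ∈ pvBnd jobs idx → idx ≤ x
  | [], idx, x, h => by simp [pvBnd] at h; omega
  | ops :: rest, idx, x, h => by
    simp only [pvBnd, List.mem_cons] at h
    rcases h with h | h
    · omega
    · have := pvBnd_lb rest (idx + (ops.length : Int)) x h
      omega

theorem pvBnd_self : ∀ (jobs : List (List (Int × Int))) (idx : Int), idx ∈ pvBnd jobs idx
  | [], idx => by simp [pvBnd]
  | ops :: rest, idx => by simp [pvBnd]

theorem foldA_eq : ∀ (jobs : List (List (Int × Int))) (acc : List (Int × Int)) (idx : Int),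
    jobs.foldl
      (fun (st : List (Int × Int) × Int) operations =>
        (st.1 ++ (PySem.List.pyRange st.2 (st.2 + (operations.length : Int) - 1) 1).map
            (fun i => (i, i + 1)),
         st.2 + (operations.length : Int)))
      (acc, idx)
    = (acc ++ pvP jobs idx, pvTot jobs idx)
  | [], acc, idx => by simp [pvP, pvTot]
  | ops :: rest, acc, idx => by
    simp only [List.foldl_cons]
    rw [foldA_eq rest]
    simp [pvP, pvTot]

theorem foldB_eq : ∀ (jobs : List (List (Int × Int))) (s : PySem.Set Int) (idx : Int),
    jobs.foldl
      (fun (st : PySem.Set Int × Int) operations =>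
        (PySem.Set.add st.1 st.2, st.2 + (operations.length : Int)))
      (s, idx)
    = ((pvBnd jobs idx).dropLast.foldl PySem.Set.add s, pvTot jobs idx) := by
  intro jobs
  induction jobs with
  | nil => intro s idx; simp [pvBnd, pvTot]
  | cons ops rest ih =>
    intro s idx
    simp only [List.foldl_cons]
    rw [ih]
    cases rest with
    | nil => simp [pvBnd, pvTot]
    | cons o r => simp [pvBnd, pvTot]

theorem mem_foldB : ∀ (bs : List Int) (s : PySem.Set Int) (x : Int),
    x ∈ bs.foldl PySem.Set.add s ↔ x ∈ s ∨ x ∈ bs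
  | [], s, x => by simp
  | b :: bs, s, x => by
    simp only [List.foldl_cons, mem_foldB bs, PySem.Set.mem_add, List.mem_cons]
    tauto

-- pvBnd ends with the final offset
theorem pvBnd_spec : ∀ (jobs : List (List (Int × Int))) (idx : Int),
    pvBnd jobs idx = (pvBnd jobs idx).dropLast ++ [pvTot jobs idx]
  | [], idx => by simp [pvBnd, pvTot]
  | ops :: rest, idx => by
    have ih := pvBnd_spec rest (idx + (ops.length : Int))
    have hne : pvBnd rest (idx + (ops.length : Int)) ≠ [] := by
      cases rest <;> simp [pvBnd]
    simp only [pvBnd, pvTot, List.dropLast_cons_of_ne_nil hne, List.cons_append]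
    exact congrArg _ ih

-- main characterisation: A's emission = B's boundary-filtered flat range
theorem pvP_eq_filter : ∀ (jobs : List (List (Int × Int))) (idx : Int),
    pvP jobs idx
    = ((PySem.List.pyRange idx (pvTot jobs idx - 1) 1).filter
        (fun i => !((pvBnd jobs idx).contains (i + 1)))).map (fun i => (i, i + 1)) := by
  intro jobs
  induction jobs with
  | nil =>
    intro idx
    simp [pvP, pvTot, PySem.List.pyRange_one_eq_nil (by omega : idx - 1 ≤ idx)]
  | cons ops rest ih =>
    intro idx
    simp only [pvP, pvTot, pvBnd]
    have htot : idx + (ops.length : Int) ≤ pvTot rest (idx + (ops.length : Int)) :=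
      pvTot_ge rest (idx + (ops.length : Int))
    by_cases hc1 : (ops.length : Int) = 0
    · -- empty job: first segment empty, boundary idx never tested (i+1 > idx)
      rw [PySem.List.pyRange_one_eq_nil (by omega : idx + (ops.length : Int) - 1 ≤ idx),
          List.map_nil, List.nil_append]
      have hidx : idx + (ops.length : Int) = idx := by omega
      rw [hidx, ih idx]
      congr 1
      apply List.filter_congr
      intro i hi
      rw [PySem.List.mem_pyRange_one] at hi
      have hne : ¬ ((i + 1) = idx) := by omega
      simp [hne]
    · -- split the flat range at the end of the first job's arcs
      rw [PySem.List.pyRange_one_append idx (idx + (ops.length : Int) - 1)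
            (pvTot rest (idx + (ops.length : Int)) - 1) (by omega) (by omega),
          List.filter_append, List.map_append]
      congr 1
      · -- first segment: every index kept
        have hself : List.filter
            (fun i => !((idx :: pvBnd rest (idx + (ops.length : Int))).contains (i + 1)))
            (PySem.List.pyRange idx (idx + (ops.length : Int) - 1) 1)
            = PySem.List.pyRange idx (idx + (ops.length : Int) - 1) 1 := by
          rw [List.filter_eq_self]
          intro i hi
          rw [PySem.List.mem_pyRange_one] at hi
          have hnm : (i + 1) ∉ idx :: pvBnd rest (idx + (ops.length : Int)) := by
            intro hmem
            rcases List.mem_cons.mp hmem with h | h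
            · omega
            · have := pvBnd_lb rest (idx + (ops.length : Int)) (i + 1) h
              omega
          simp [hnm]
        rw [hself]
      · -- remainder: the boundary index is dropped, the rest matches the IH
        by_cases hS : idx + (ops.length : Int) ≤ pvTot rest (idx + (ops.length : Int)) - 1
        · rw [PySem.List.pyRange_one_cons
              (by omega : idx + (ops.length : Int) - 1 < pvTot rest (idx + (ops.length : Int)) - 1),
              List.filter_cons,
              (by omega : idx + (ops.length : Int) - 1 + 1 = idx + (ops.length : Int))]
          have hmem : (idx + (ops.length : Int))
              ∈ idx :: pvBnd rest (idx + (ops.length : Int)) :=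
            List.mem_cons_of_mem _ (pvBnd_self rest (idx + (ops.length : Int)))
          simp [hmem]
          rw [ih (idx + (ops.length : Int))]
          congr 1
          apply List.filter_congr
          intro i hi
          rw [PySem.List.mem_pyRange_one] at hi
          have hne : ¬ ((i + 1) = idx) := by omega
          simp [hne]
        · -- remaining jobs contribute nothing
          have heq : pvTot rest (idx + (ops.length : Int)) = idx + (ops.length : Int) := by omega
          rw [PySem.List.pyRange_one_eq_nil
              (by omega : pvTot rest (idx + (ops.length : Int)) - 1 ≤ idx + (ops.length : Int) - 1),
              ih (idx + (ops.length : Int)), heq,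
              PySem.List.pyRange_one_eq_nil
              (by omega : idx + (ops.length : Int) - 1 ≤ idx + (ops.length : Int))]
          simp

-- ===== VERDICT (by name: the statement is the Claim_ definition above) =====
theorem compute_precedences_spec : Claim_equal_compute_precedences := by
  unfold Claim_equal_compute_precedences
  intro jobs _
  unfold Spec_compute_precedences compute_precedences compute_precedences_alt
  rw [foldA_eq, foldB_eq]
  simp only [List.nil_append]
  rw [pvP_eq_filter]
  congr 1
  apply List.filter_congr
  intro i _
  have hiff : ((i + 1) ∈ PySem.Set.add
        ((pvBnd jobs 0).dropLast.foldl PySem.Set.add PySem.Set.empty) (pvTot jobs 0))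
      ↔ (i + 1) ∈ pvBnd jobs 0 := by
    rw [PySem.Set.mem_add, mem_foldB]
    have hspec := pvBnd_spec jobs 0
    constructor
    · rintro ((h | h) | h)
      · simp [PySem.Set.empty] at h
      · exact List.mem_of_mem_dropLast h
      · rw [hspec]; simp [h]
    · intro h
      rw [hspec] at h
      simp only [List.mem_append, List.mem_singleton] at h
      tauto
  have hcv : PySem.Set.contains (PySem.Set.add
        ((pvBnd jobs 0).dropLast.foldl PySem.Set.add PySem.Set.empty) (pvTot jobs 0)) (i + 1)
      = (pvBnd jobs 0).contains (i + 1) :=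
    Bool.coe_iff_coe.mp (by rw [PySem.Set.contains_iff _ _, List.contains_iff_mem]; exact hiff)
  simp only [hcv]
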